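-- pv_equiv track=rewrite | github.com/vnim94/dsa | patterns/two-pointers/minAbsSumOfTwo.py | minAbsSumOfTwo
-- ===== SOURCE A (Python) =====
-- def minAbsSumOfTwo(A):
--     min = None
--     length = len(A)
--
--     if length < 2:
--         return 0
--
--     # iterate A
--     for i in range(length):
--         # iterate from i + 1 onwards
--         for j in range(i+1,length):
--             # check abs sum against min
--             absSum = abs(A[i]+A[j])
--             if min == None or absSum < min:
--                 min = absSum
--     # return min
--     return min
-- ===== SOURCE B (Python) =====
-- def minAbsSumOfTwo(A):
--     # sort, then walk two pointers inward from both ends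
--     if len(A) < 2:
--         return 0
--     xs = sorted(A)
--     i = 0
--     j = len(xs) - 1
--     best = abs(xs[i] + xs[j])
--     while i < j:
--         s = xs[i] + xs[j]
--         if abs(s) < best:
--             best = abs(s)
--         if s < 0:
--             i += 1
--         else:
--             j -= 1
--     return best
-- ===== Notes on version B (the rewrite author's own statement) =====
-- stated objective: faster
-- what changed: Replaces the quadratic scan over all index pairs by sort-then-two-pointers from both ends.
import Mathlib
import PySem

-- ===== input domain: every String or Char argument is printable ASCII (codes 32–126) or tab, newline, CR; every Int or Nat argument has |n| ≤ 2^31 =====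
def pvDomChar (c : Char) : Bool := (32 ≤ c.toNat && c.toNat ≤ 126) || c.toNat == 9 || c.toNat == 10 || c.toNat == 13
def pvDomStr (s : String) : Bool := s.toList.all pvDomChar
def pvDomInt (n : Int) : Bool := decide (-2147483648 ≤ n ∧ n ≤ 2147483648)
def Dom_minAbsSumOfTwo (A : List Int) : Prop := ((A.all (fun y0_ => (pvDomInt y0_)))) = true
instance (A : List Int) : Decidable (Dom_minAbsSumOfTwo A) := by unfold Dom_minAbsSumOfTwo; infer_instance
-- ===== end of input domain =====

-- B replaces A's quadratic scan over all index pairs by sort-then-two-pointers (objective: faster).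

-- ===== PORT A =====
def minAbsSumOfTwo (A : List Int) : Int :=
  let length : Int := A.length
  if length < 2 then 0
  else
    let m : Option Int :=
      (PySem.List.pyRange 0 length 1).foldl (fun acc i =>
        (PySem.List.pyRange (i + 1) length 1).foldl (fun acc j =>
          let absSum := |PySem.List.pyGetD A i 0 + PySem.List.pyGetD A j 0|
          match acc with
          | none => some absSum
          | some m => if absSum < m then some absSum else some m) acc) none
    -- Python returns `min`, which is an int here: with length ≥ 2 the loops run at least once
    m.getD 0

-- ===== PORT B =====
def minAbsSumOfTwo_altLoop (xs : List Int) (i j : Nat) (best : Int) : Int :=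
  if i < j then
    let s := xs.getD i 0 + xs.getD j 0
    let best' := if |s| < best then |s| else best
    if s < 0 then minAbsSumOfTwo_altLoop xs (i + 1) j best'
    else minAbsSumOfTwo_altLoop xs i (j - 1) best'
  else best
termination_by j - i
decreasing_by all_goals omega

def minAbsSumOfTwo_alt (A : List Int) : Int :=
  if A.length < 2 then 0
  else
    let xs := PySem.List.sorted A (fun x => x) false
    minAbsSumOfTwo_altLoop xs 0 (xs.length - 1) |xs.getD 0 0 + xs.getD (xs.length - 1) 0|

-- ===== PRECONDITION & SPEC =====
def Spec_minAbsSumOfTwo (A : List Int) (out : Int) : Prop := out = minAbsSumOfTwo_alt A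
instance (A : List Int) (out : Int) : Decidable (Spec_minAbsSumOfTwo A out) := by unfold Spec_minAbsSumOfTwo; infer_instance

-- ===== CLAIM (what is proved, stated in full; the proofs are below) =====
def Claim_equal_minAbsSumOfTwo : Prop := ∀ (A : List Int), Dom_minAbsSumOfTwo A → Spec_minAbsSumOfTwo A (minAbsSumOfTwo A)

-- ===== LEMMAS AND PROOFS =====

/-- A pair of elements (with multiplicity) of `l`. -/
def pvPairMem (l : List Int) (a b : Int) : Prop := ({a, b} : Multiset Int) ≤ (l : Multiset Int)

/-- `r` is the minimum of `|a+b|` over all pairs of elements of `l`. -/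
def pvIsMin (l : List Int) (r : Int) : Prop :=
  (∃ a b, pvPairMem l a b ∧ r = |a + b|) ∧ (∀ a b, pvPairMem l a b → r ≤ |a + b|)

def pvStep (acc : Option Int) (v : Int) : Option Int :=
  match acc with
  | none => some v
  | some m => if v < m then some v else some m

def pvPairsList : List Int → List Int
  | [] => []
  | x :: rest => rest.map (fun y => |x + y|) ++ pvPairsList rest

theorem pvIsMin_unique {l : List Int} {r₁ r₂ : Int} (h₁ : pvIsMin l r₁) (h₂ : pvIsMin l r₂) :
    r₁ = r₂ := by
  obtain ⟨⟨a₁, b₁, hm₁, he₁⟩, hb₁⟩ := h₁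
  obtain ⟨⟨a₂, b₂, hm₂, he₂⟩, hb₂⟩ := h₂
  have := hb₁ a₂ b₂ hm₂
  have := hb₂ a₁ b₁ hm₁
  omega

theorem pvPairMem_cons {x : Int} {t : List Int} {a b : Int} :
    pvPairMem (x :: t) a b ↔ (a = x ∧ b ∈ t) ∨ (b = x ∧ a ∈ t) ∨ pvPairMem t a b := by
  unfold pvPairMem
  have hcoe : ((x :: t : List Int) : Multiset Int) = x ::ₘ (t : Multiset Int) := by simp
  rw [hcoe]
  constructor
  · intro h
    by_cases hax : a = x
    · subst hax
      left
      refine ⟨rfl, ?_⟩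
      have h' : ({b} : Multiset Int) ≤ (t : Multiset Int) := by
        have : a ::ₘ ({b} : Multiset Int) ≤ a ::ₘ (t : Multiset Int) := by
          simpa [Multiset.insert_eq_cons] using h
        exact (Multiset.cons_le_cons_iff a).mp this
      simpa using h'
    · by_cases hbx : b = x
      · subst hbx
        right; left
        refine ⟨rfl, ?_⟩
        have h2 : b ::ₘ ({a} : Multiset Int) ≤ b ::ₘ (t : Multiset Int) := by
          rw [Multiset.pair_comm] at h
          simpa [Multiset.insert_eq_cons] using h
        have h' := (Multiset.cons_le_cons_iff b).mp h2
        simpa using h'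
      · right; right
        rw [Multiset.le_iff_count] at h ⊢
        intro c
        have hc := h c
        by_cases hcx : c = x
        · subst hcx
          have hz : Multiset.count c ({a, b} : Multiset Int) = 0 := by
            rw [Multiset.count_eq_zero]
            simp only [Multiset.insert_eq_cons, Multiset.mem_cons, Multiset.mem_singleton]
            rintro (h | h) <;> [exact hax h.symm; exact hbx h.symm]
          rw [hz]; exact Nat.zero_le _
        · rw [Multiset.count_cons_of_ne hcx] at hc
          exact hc
  · rintro (⟨rfl, hb⟩ | ⟨rfl, ha⟩ | h)
    · simpa [Multiset.insert_eq_cons] using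
        Multiset.cons_le_cons a (Multiset.singleton_le.mpr (Multiset.mem_coe.mpr hb))
    · rw [Multiset.pair_comm]
      simpa [Multiset.insert_eq_cons] using
        Multiset.cons_le_cons b (Multiset.singleton_le.mpr (Multiset.mem_coe.mpr ha))
    · exact le_trans h (Multiset.le_cons_self _ _)

theorem pvPairMem_nil {a b : Int} : ¬ pvPairMem [] a b := by
  intro h
  simp [pvPairMem, Multiset.insert_eq_cons] at h

theorem pvMem_pairsList {l : List Int} {v : Int} :
    v ∈ pvPairsList l ↔ ∃ a b, pvPairMem l a b ∧ v = |a + b| := by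
  induction l with
  | nil =>
    simp only [pvPairsList, List.not_mem_nil, false_iff]
    rintro ⟨a, b, hm, -⟩
    exact pvPairMem_nil hm
  | cons x t ih =>
    simp only [pvPairsList, List.mem_append, List.mem_map]
    constructor
    · rintro (⟨y, hy, rfl⟩ | h)
      · exact ⟨x, y, pvPairMem_cons.mpr (Or.inl ⟨rfl, hy⟩), rfl⟩
      · obtain ⟨a, b, hm, rfl⟩ := ih.mp h
        exact ⟨a, b, pvPairMem_cons.mpr (Or.inr (Or.inr hm)), rfl⟩
    · rintro ⟨a, b, hm, rfl⟩
      rcases pvPairMem_cons.mp hm with ⟨rfl, hb⟩ | ⟨rfl, ha⟩ | h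
      · exact Or.inl ⟨b, hb, rfl⟩
      · exact Or.inl ⟨a, ha, by rw [Int.add_comm]⟩
      · exact Or.inr (ih.mpr ⟨a, b, h, rfl⟩)

theorem pvGetD_pairMem {l : List Int} {p q : Nat} (hpq : p < q) (hq : q < l.length) :
    pvPairMem l (l.getD p 0) (l.getD q 0) := by
  induction l generalizing p q with
  | nil => simp at hq
  | cons x t ih =>
    match q, hpq with
    | q' + 1, _ =>
      have hq' : q' < t.length := by simpa using hq
      match p with
      | 0 =>
        refine pvPairMem_cons.mpr (Or.inl ⟨rfl, ?_⟩)
        simp only [List.getD_cons_succ]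
        rw [List.getD_eq_getElem _ _ hq']
        exact List.getElem_mem _
      | p' + 1 =>
        have := ih (p := p') (q := q') (by omega) hq'
        simpa using pvPairMem_cons.mpr (Or.inr (Or.inr this))

theorem pvPairMem_exists_idx {l : List Int} {a b : Int} (h : pvPairMem l a b) :
    ∃ p q, p < q ∧ q < l.length ∧
      ((l.getD p 0 = a ∧ l.getD q 0 = b) ∨ (l.getD p 0 = b ∧ l.getD q 0 = a)) := by
  induction l with
  | nil => exact absurd h pvPairMem_nil
  | cons x t ih =>
    rcases pvPairMem_cons.mp h with ⟨rfl, hb⟩ | ⟨rfl, ha⟩ | h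
    · obtain ⟨i, hi, hib⟩ := List.getElem_of_mem hb
      exact ⟨0, i + 1, by omega, by simpa using hi,
        Or.inl ⟨rfl, by rw [List.getD_cons_succ, List.getD_eq_getElem _ _ hi]; exact hib⟩⟩
    · obtain ⟨i, hi, hia⟩ := List.getElem_of_mem ha
      exact ⟨0, i + 1, by omega, by simpa using hi,
        Or.inr ⟨rfl, by rw [List.getD_cons_succ, List.getD_eq_getElem _ _ hi]; exact hia⟩⟩
    · obtain ⟨p, q, hpq, hq, hv⟩ := ih h
      exact ⟨p + 1, q + 1, by omega, by simpa using Nat.succ_lt_succ hq, by simpa using hv⟩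

-- ===== A-side =====

theorem pvFoldl_step_some (vs : List Int) (m : Int) :
    vs.foldl pvStep (some m) = some (vs.foldl min m) := by
  induction vs generalizing m with
  | nil => rfl
  | cons v vs ih =>
    simp only [List.foldl_cons, pvStep]
    rcases lt_or_ge v m with h | h
    · rw [if_pos h, ih, min_eq_right h.le]
    · rw [if_neg (not_lt.mpr h), ih, min_eq_left h]

theorem pvFoldl_min_le_init (vs : List Int) (m : Int) : vs.foldl min m ≤ m := by
  induction vs generalizing m with
  | nil => exact le_refl _
  | cons v vs ih => exact le_trans (ih _) (min_le_left _ _)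

theorem pvFoldl_min_le_mem (vs : List Int) (m v : Int) (hv : v ∈ vs) : vs.foldl min m ≤ v := by
  induction vs generalizing m with
  | nil => cases hv
  | cons w vs ih =>
    rcases List.mem_cons.mp hv with h | h
    · subst h
      simp only [List.foldl_cons]
      exact le_trans (pvFoldl_min_le_init vs (min m v)) (min_le_right m v)
    · exact ih _ h

theorem pvFoldl_min_mem (vs : List Int) (m : Int) : vs.foldl min m = m ∨ vs.foldl min m ∈ vs := by
  induction vs generalizing m with
  | nil => exact Or.inl rfl
  | cons v vs ih =>
    rcases ih (min m v) with h | h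
    · simp only [List.foldl_cons]
      rcases le_total m v with hmv | hmv
      · left; rw [h, min_eq_left hmv]
      · right
        rw [h, min_eq_right hmv]
        simp
    · right; right
      simp only [List.foldl_cons]
      exact h

def pvPairsFold : List Int → Option Int → Option Int
  | [], acc => acc
  | x :: rest, acc => pvPairsFold rest (rest.foldl (fun acc y => pvStep acc |x + y|) acc)

theorem pvPairsFold_eq (l : List Int) : ∀ acc, pvPairsFold l acc = (pvPairsList l).foldl pvStep acc := by
  induction l with
  | nil => intro acc; rfl
  | cons x rest ih =>
    intro acc
    simp only [pvPairsFold, pvPairsList, List.foldl_append, List.foldl_map, ih]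

theorem pvOuter (l : List Int) : ∀ (n k : Nat) (acc : Option Int), k + n = l.length →
    (PySem.List.pyRange (k : Int) (l.length : Int) 1).foldl (fun acc i =>
        (PySem.List.pyRange (i + 1) (l.length : Int) 1).foldl (fun acc j =>
          let absSum := |PySem.List.pyGetD l i 0 + PySem.List.pyGetD l j 0|
          match acc with
          | none => some absSum
          | some m => if absSum < m then some absSum else some m) acc) acc
    = pvPairsFold (l.drop k) acc := by
  intro n
  induction n with
  | zero =>
    intro k acc hk
    rw [PySem.List.pyRange_one_eq_nil (by omega)]
    have : k = l.length := by omega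
    subst this
    simp [pvPairsFold]
  | succ n ih =>
    intro k acc hk
    have hkl : k < l.length := by omega
    rw [PySem.List.pyRange_one_cons (by exact_mod_cast hkl)]
    rw [List.foldl_cons]
    have hdrop : l.drop k = l[k] :: l.drop (k + 1) := List.drop_eq_getElem_cons hkl
    rw [hdrop]
    simp only [pvPairsFold]
    have hcast : ((k : Int) + 1) = ((k + 1 : Nat) : Int) := by push_cast; ring
    rw [hcast, ih (k + 1) _ (by omega)]
    have hgk : PySem.List.pyGetD l (k : Int) 0 = l[k] := by
      rw [PySem.List.pyGetD_natCast]
      exact List.getD_eq_getElem _ _ hkl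
    congr 1
    simp only [hgk]
    have hinner := PySem.List.foldl_pyRange_pyGetD' l 0
      (fun acc y => pvStep acc |l[k] + y|) acc
      (a := ((k : Nat) + 1 : Int)) (by omega)
    simp only [pvStep] at hinner
    rw [hcast] at hinner
    simp only [Int.toNat_natCast] at hinner
    exact hinner

theorem pvA_eq_pairs (l : List Int) (h2 : 2 ≤ l.length) :
    minAbsSumOfTwo l = ((pvPairsList l).foldl pvStep none).getD 0 := by
  unfold minAbsSumOfTwo
  have hlt : ¬ ((l.length : Int) < 2) := by omega
  rw [if_neg hlt]
  have h := pvOuter l l.length 0 none (by omega)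
  simp only [Nat.cast_zero, List.drop_zero] at h
  rw [h, pvPairsFold_eq]

theorem pvPairsList_ne_nil {l : List Int} (h2 : 2 ≤ l.length) : pvPairsList l ≠ [] := by
  match l, h2 with
  | x :: y :: t, _ => simp [pvPairsList]

theorem pvA_isMin (l : List Int) (h2 : 2 ≤ l.length) : pvIsMin l (minAbsSumOfTwo l) := by
  rw [pvA_eq_pairs l h2]
  obtain ⟨v, vs, hvv⟩ := List.exists_cons_of_ne_nil (pvPairsList_ne_nil h2)
  rw [hvv]
  simp only [List.foldl_cons, pvStep, pvFoldl_step_some, Option.getD_some]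
  constructor
  · have : vs.foldl min v ∈ v :: vs := by
      rcases pvFoldl_min_mem vs v with h | h
      · rw [h]; exact List.mem_cons_self
      · exact List.mem_cons_of_mem _ h
    rw [← hvv] at this
    exact pvMem_pairsList.mp this
  · intro a b hm
    have hv : |a + b| ∈ pvPairsList l := pvMem_pairsList.mpr ⟨a, b, hm, rfl⟩
    rw [hvv] at hv
    rcases List.mem_cons.mp hv with h | h
    · rw [← h]; exact pvFoldl_min_le_init _ _
    · exact pvFoldl_min_le_mem _ _ _ h

-- ===== B-side =====

theorem pvSorted_getD_mono {xs : List Int} (hs : xs.Pairwise (· ≤ ·)) {p q : Nat}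
    (hpq : p ≤ q) (hq : q < xs.length) : xs.getD p 0 ≤ xs.getD q 0 := by
  rcases eq_or_lt_of_le hpq with h | h
  · subst h; exact le_refl _
  · have hp : p < xs.length := lt_trans h hq
    rw [List.getD_eq_getElem _ _ hp, List.getD_eq_getElem _ _ hq]
    exact List.pairwise_iff_getElem.mp hs p q hp hq h

theorem pvAltLoop_spec_aux (xs : List Int) (hs : xs.Pairwise (· ≤ ·)) :
    ∀ (d i j : Nat) (best : Int), j - i ≤ d → j < xs.length → i ≤ j →
    (∃ a b, pvPairMem xs a b ∧ best = |a + b|) →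
    (∀ p q : Nat, p < q → q < xs.length → (p < i ∨ j < q) → best ≤ |xs.getD p 0 + xs.getD q 0|) →
    (∃ a b, pvPairMem xs a b ∧ minAbsSumOfTwo_altLoop xs i j best = |a + b|) ∧
    (∀ p q : Nat, p < q → q < xs.length → minAbsSumOfTwo_altLoop xs i j best ≤ |xs.getD p 0 + xs.getD q 0|) := by
  intro d
  induction d with
  | zero =>
    intro i j best hd hj hij h1 h2
    have hij2 : ¬ i < j := by omega
    rw [minAbsSumOfTwo_altLoop, if_neg hij2]
    exact ⟨h1, fun p q hpq hq => h2 p q hpq hq (by omega)⟩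
  | succ d ih =>
    intro i j best hd hj hij h1 h2
    by_cases hij2 : i < j
    · have hrec : minAbsSumOfTwo_altLoop xs i j best =
          if xs.getD i 0 + xs.getD j 0 < 0 then
            minAbsSumOfTwo_altLoop xs (i + 1) j
              (if |xs.getD i 0 + xs.getD j 0| < best then |xs.getD i 0 + xs.getD j 0| else best)
          else
            minAbsSumOfTwo_altLoop xs i (j - 1)
              (if |xs.getD i 0 + xs.getD j 0| < best then |xs.getD i 0 + xs.getD j 0| else best) := by
        rw [minAbsSumOfTwo_altLoop]
        simp only [if_pos hij2]
      set s := xs.getD i 0 + xs.getD j 0 with hs_def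
      set best' := if |s| < best then |s| else best with hb_def
      rw [hrec]
      have hb1 : ∃ a b, pvPairMem xs a b ∧ best' = |a + b| := by
        by_cases hlt : |s| < best
        · exact ⟨xs.getD i 0, xs.getD j 0, pvGetD_pairMem hij2 hj, by rw [hb_def, if_pos hlt]⟩
        · rw [hb_def, if_neg hlt]
          exact h1
      have hble : best' ≤ best := by
        rw [hb_def]
        split_ifs with h
        · omega
        · exact le_refl _
      have hbs : best' ≤ |s| := by
        rw [hb_def]
        split_ifs with h
        · exact le_refl _
        · omega
      have h2' : ∀ p q : Nat, p < q → q < xs.length → (p < i ∨ j < q) →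
          best' ≤ |xs.getD p 0 + xs.getD q 0| :=
        fun p q a b c => le_trans hble (h2 p q a b c)
      by_cases hneg : s < 0
      · rw [if_pos hneg]
        refine ih (i + 1) j best' (by omega) hj (by omega) hb1 ?_
        intro p q hpq hq hcond
        by_cases hold : p < i ∨ j < q
        · exact h2' p q hpq hq hold
        · have hpi : p = i := by omega
          have hqj : q ≤ j := by omega
          have hmono : xs.getD q 0 ≤ xs.getD j 0 := pvSorted_getD_mono hs hqj hj
          have hsum : xs.getD p 0 + xs.getD q 0 ≤ s := by
            rw [hs_def, hpi]
            omega
          have ha1 : |s| = -s := abs_of_neg hneg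
          have ha2 : |xs.getD p 0 + xs.getD q 0| = -(xs.getD p 0 + xs.getD q 0) :=
            abs_of_neg (by omega)
          omega
      · rw [if_neg hneg]
        refine ih i (j - 1) best' (by omega) (by omega) (by omega) hb1 ?_
        intro p q hpq hq hcond
        by_cases hold : p < i ∨ j < q
        · exact h2' p q hpq hq hold
        · have hqj : q = j := by omega
          have hpi : i ≤ p := by omega
          have hmono : xs.getD i 0 ≤ xs.getD p 0 := pvSorted_getD_mono hs hpi (by omega)
          have hsum : s ≤ xs.getD p 0 + xs.getD q 0 := by
            rw [hs_def, hqj]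
            omega
          have ha1 : |s| = s := abs_of_nonneg (by omega)
          have ha2 : |xs.getD p 0 + xs.getD q 0| = xs.getD p 0 + xs.getD q 0 :=
            abs_of_nonneg (by omega)
          omega
    · rw [minAbsSumOfTwo_altLoop, if_neg hij2]
      exact ⟨h1, fun p q hpq hq => h2 p q hpq hq (by omega)⟩

theorem pvAltLoop_spec (xs : List Int) (hs : xs.Pairwise (· ≤ ·)) :
    ∀ (i j : Nat) (best : Int), j < xs.length → i ≤ j →
    (∃ a b, pvPairMem xs a b ∧ best = |a + b|) →
    (∀ p q : Nat, p < q → q < xs.length → (p < i ∨ j < q) → best ≤ |xs.getD p 0 + xs.getD q 0|) →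
    (∃ a b, pvPairMem xs a b ∧ minAbsSumOfTwo_altLoop xs i j best = |a + b|) ∧
    (∀ p q : Nat, p < q → q < xs.length → minAbsSumOfTwo_altLoop xs i j best ≤ |xs.getD p 0 + xs.getD q 0|) :=
  fun i j best hj hij h1 h2 =>
    pvAltLoop_spec_aux xs hs (j - i) i j best (le_refl _) hj hij h1 h2

theorem pvB_isMin (l : List Int) (h2 : 2 ≤ l.length) : pvIsMin l (minAbsSumOfTwo_alt l) := by
  unfold minAbsSumOfTwo_alt
  rw [if_neg (by omega)]
  set xs := PySem.List.sorted l (fun x => x) false with hxs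
  have hperm : xs.Perm l := PySem.List.sorted_perm l _ _
  have hlen : xs.length = l.length := hperm.length_eq
  have hco : (xs : Multiset Int) = (l : Multiset Int) := Multiset.coe_eq_coe.mpr hperm
  have hpm : ∀ a b : Int, pvPairMem xs a b ↔ pvPairMem l a b := by
    intro a b
    unfold pvPairMem
    rw [hco]
  have hsp : xs.Pairwise (· ≤ ·) := by
    have := PySem.List.sorted_pairwise l (fun x => x)
    simpa using this
  obtain ⟨hex, hall⟩ := pvAltLoop_spec xs hsp 0 (xs.length - 1)
      |xs.getD 0 0 + xs.getD (xs.length - 1) 0| (by omega) (by omega)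
      ⟨xs.getD 0 0, xs.getD (xs.length - 1) 0, pvGetD_pairMem (by omega) (by omega), rfl⟩
      (by
        intro p q hpq hq hcond
        rcases hcond with h | h <;> omega)
  constructor
  · obtain ⟨a, b, hm, he⟩ := hex
    exact ⟨a, b, (hpm a b).mp hm, he⟩
  · intro a b hm
    obtain ⟨p, q, hpq, hq, hv⟩ := pvPairMem_exists_idx ((hpm a b).mpr hm)
    have hle := hall p q hpq hq
    rcases hv with ⟨hva, hvb⟩ | ⟨hva, hvb⟩
    · rw [hva, hvb] at hle
      exact hle
    · rw [hva, hvb] at hle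
      rw [Int.add_comm a b]
      exact hle

-- ===== VERDICT (by name: the statement is the Claim_ definition above) =====
theorem minAbsSumOfTwo_spec : Claim_equal_minAbsSumOfTwo := by
  intro A _
  unfold Spec_minAbsSumOfTwo
  by_cases h2 : 2 ≤ A.length
  · exact pvIsMin_unique (pvA_isMin A h2) (pvB_isMin A h2)
  · unfold minAbsSumOfTwo minAbsSumOfTwo_alt
    have h : (A.length : Int) < 2 := by exact_mod_cast Nat.lt_of_not_le h2
    simp [h, Nat.lt_of_not_le h2]
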